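-- pv_equiv track=rewrite | github.com/tbrup/ctf-writeups | HackyEaster/he2022/level7/ch30/solve30.py | stipple
-- ===== SOURCE A (Python) =====
-- def stipple(r, g, b, shiftr = 0, shiftg = 0):
--     res = ''
--     for i in range(len(r)):
--         res += str(r[(i+shiftr)%len(r)] % 2)
--         res += str(g[(i+shiftg)%len(r)] % 2)
--         res += str(b[(i)%len(r)] % 2)
--     resBin = []
--     for i in range(0,len(res),8):
--         resBin.append(int(res[i:i+8],2))
--     return resBin
-- ===== SOURCE B (Python) =====
-- def stipple(r, g, b, shiftr=0, shiftg=0):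
--     n = len(r)
--     res = []
--     cur = 0
--     cnt = 0
--     for i in range(n):
--         for bit in (r[(i + shiftr) % n] % 2, g[(i + shiftg) % n] % 2, b[i % n] % 2):
--             cur = cur * 2 + bit
--             cnt += 1
--             if cnt == 8:
--                 res.append(cur)
--                 cur = 0
--                 cnt = 0
--     if cnt > 0:
--         res.append(cur)
--     return res
-- ===== Notes on version B (the rewrite author's own statement) =====
-- stated objective: alternative
-- what changed: B drops A's intermediate bit-string entirely: instead of concatenating str(bit) characters and then re-parsing 8-character slices with int(s,2), it packs the same LSB stream in one pass with a running byte accumulator (cur = cur*2 + bit) and a bit counter, flushing each full byte and the final partial group as-is.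
import Mathlib
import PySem

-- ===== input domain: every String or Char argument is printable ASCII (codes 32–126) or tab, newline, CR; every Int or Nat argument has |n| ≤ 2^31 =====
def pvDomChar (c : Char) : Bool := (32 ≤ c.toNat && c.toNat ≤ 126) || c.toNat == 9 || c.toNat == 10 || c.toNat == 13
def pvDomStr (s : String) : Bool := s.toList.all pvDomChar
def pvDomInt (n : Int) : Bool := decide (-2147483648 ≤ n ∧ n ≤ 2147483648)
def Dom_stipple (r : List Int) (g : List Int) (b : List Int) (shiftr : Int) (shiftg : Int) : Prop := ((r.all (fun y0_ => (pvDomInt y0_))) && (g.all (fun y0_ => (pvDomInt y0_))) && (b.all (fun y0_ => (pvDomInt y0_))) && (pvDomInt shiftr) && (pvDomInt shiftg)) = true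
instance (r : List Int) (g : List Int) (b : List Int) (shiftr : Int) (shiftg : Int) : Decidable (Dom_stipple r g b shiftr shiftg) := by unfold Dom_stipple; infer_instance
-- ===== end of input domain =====

-- B replaces A's bit-string building + 8-char slicing + int(...,2) parsing by a single pass
-- with a running byte accumulator and bit counter (objective: alternative decomposition, no string detour).

-- ===== PORT A =====
-- hand port of int(s, 2): exact on strings of '0'/'1' digits, which is all 'res' ever contains
def binOfChars (cs : List Char) : Int :=
  cs.foldl (fun a c => 2 * a + (if c = '1' then 1 else 0)) 0

def stipple (r : List Int) (g : List Int) (b : List Int) (shiftr : Int) (shiftg : Int) : List Int :=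
  let res : List Char :=
    (PySem.List.pyRange 0 (r.length : Int) 1).foldl (fun res i =>
      ((res ++ (PySem.Int.toStr (PySem.Int.mod (PySem.List.pyGetD r (PySem.Int.mod (i + shiftr) (r.length : Int)) 0) 2)).toList)
            ++ (PySem.Int.toStr (PySem.Int.mod (PySem.List.pyGetD g (PySem.Int.mod (i + shiftg) (r.length : Int)) 0) 2)).toList)
            ++ (PySem.Int.toStr (PySem.Int.mod (PySem.List.pyGetD b (PySem.Int.mod i (r.length : Int)) 0) 2)).toList) []
  (PySem.List.pyRange 0 (res.length : Int) 8).foldl (fun acc i =>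
    acc ++ [binOfChars (PySem.List.slice res (some i) (some (i + 8)))]) []

-- ===== PORT B =====
def stipple_alt (r : List Int) (g : List Int) (b : List Int) (shiftr : Int) (shiftg : Int) : List Int :=
  let n : Int := r.length
  let st :=
    (PySem.List.pyRange 0 n 1).foldl (fun (st : List Int × Int × Int) i =>
      [PySem.Int.mod (PySem.List.pyGetD r (PySem.Int.mod (i + shiftr) n) 0) 2,
       PySem.Int.mod (PySem.List.pyGetD g (PySem.Int.mod (i + shiftg) n) 0) 2,
       PySem.Int.mod (PySem.List.pyGetD b (PySem.Int.mod i n) 0) 2].foldl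
        (fun st bit =>
          let cur := st.2.1 * 2 + bit
          let cnt := st.2.2 + 1
          if cnt = 8 then (st.1 ++ [cur], 0, 0) else (st.1, cur, cnt)) st)
      (([] : List Int), (0 : Int), (0 : Int))
  if st.2.2 > 0 then st.1 ++ [st.2.1] else st.1

-- ===== PRECONDITION & SPEC =====
-- Pre_ excludes exactly the inputs on which Python A raises IndexError: when r is nonempty,
-- the loop indexes g and b at every residue modulo len(r), so g and b must be at least as long as r.
def Pre_stipple (r : List Int) (g : List Int) (b : List Int) (shiftr : Int) (shiftg : Int) : Prop :=
  r.length ≤ g.length ∧ r.length ≤ b.length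
instance (r : List Int) (g : List Int) (b : List Int) (shiftr : Int) (shiftg : Int) : Decidable (Pre_stipple r g b shiftr shiftg) := by unfold Pre_stipple; infer_instance
def pvWitness_stipple : List Int × List Int × List Int × Int × Int := ([1, 2, 3], [0, 1, 4], [5, 6, 7], 1, 2)

def Spec_stipple (r : List Int) (g : List Int) (b : List Int) (shiftr : Int) (shiftg : Int) (out : List Int) : Prop := out = stipple_alt r g b shiftr shiftg
instance (r : List Int) (g : List Int) (b : List Int) (shiftr : Int) (shiftg : Int) (out : List Int) : Decidable (Spec_stipple r g b shiftr shiftg out) := by unfold Spec_stipple; infer_instance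

-- ===== CLAIM (what is proved, stated in full; the proofs are below) =====
def Claim_equal_stipple : Prop := ∀ (r : List Int) (g : List Int) (b : List Int) (shiftr : Int) (shiftg : Int), Dom_stipple r g b shiftr shiftg → Pre_stipple r g b shiftr shiftg → Spec_stipple r g b shiftr shiftg (stipple r g b shiftr shiftg)

-- ===== LEMMAS AND PROOFS =====

-- the common bit stream both programs consume
def bitsOf (r : List Int) (g : List Int) (b : List Int) (shiftr : Int) (shiftg : Int) : List Int :=
  (PySem.List.pyRange 0 (r.length : Int) 1).flatMap (fun i =>
    [PySem.Int.mod (PySem.List.pyGetD r (PySem.Int.mod (i + shiftr) (r.length : Int)) 0) 2,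
     PySem.Int.mod (PySem.List.pyGetD g (PySem.Int.mod (i + shiftg) (r.length : Int)) 0) 2,
     PySem.Int.mod (PySem.List.pyGetD b (PySem.Int.mod i (r.length : Int)) 0) 2])

def bitChar (v : Int) : Char := if v = 1 then '1' else '0'

def binVal (l : List Int) : Int := l.foldl (fun a v => 2 * a + v) 0

def pack (l : List Int) : List Int :=
  if l = [] then [] else binVal (l.take 8) :: pack (l.drop 8)
termination_by l.length
decreasing_by
  rename_i h
  have : l.length ≠ 0 := fun hh => h (List.eq_nil_of_length_eq_zero hh)
  simp [List.length_drop]; omega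

lemma bits_are_bits (r g b : List Int) (shiftr shiftg : Int) :
    ∀ v ∈ bitsOf r g b shiftr shiftg, v = 0 ∨ v = 1 := by
  intro v hv
  simp only [bitsOf, List.mem_flatMap, List.mem_cons, List.not_mem_nil, or_false] at hv
  obtain ⟨i, -, h⟩ := hv
  rcases h with h | h | h <;> subst h <;> exact PySem.Int.mod_two_eq _

lemma toList_toStr_bit (v : Int) (h : v = 0 ∨ v = 1) :
    (PySem.Int.toStr v).toList = [bitChar v] := by
  rcases h with h | h <;> subst h <;> decide

lemma binVal_snoc (p : List Int) (v : Int) : binVal (p ++ [v]) = binVal p * 2 + v := by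
  simp [binVal, List.foldl_append]; ring

lemma pack_nil : pack [] = [] := by rw [pack]; simp

lemma pack_short (p : List Int) (hne : p ≠ []) (hlt : p.length < 8) : pack p = [binVal p] := by
  rw [pack, if_neg hne, List.take_of_length_le (by omega), List.drop_of_length_le (by omega), pack_nil]

lemma pack_block (c rest : List Int) (hc : c.length = 8) :
    pack (c ++ rest) = binVal c :: pack rest := by
  rw [pack, if_neg (by simp [← List.length_pos_iff, hc])]
  rw [List.take_left' hc, List.drop_left' hc]

lemma binOfChars_map (l : List Int) (hl : ∀ v ∈ l, v = 0 ∨ v = 1) :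
    ∀ a, (l.map bitChar).foldl (fun a c => 2 * a + (if c = '1' then 1 else 0)) a
      = l.foldl (fun a v => 2 * a + v) a := by
  induction l with
  | nil => intro a; rfl
  | cons v t ih =>
    intro a
    simp only [List.map_cons, List.foldl_cons]
    rw [ih (fun x hx => hl x (List.mem_cons_of_mem _ hx))]
    rcases hl v (List.mem_cons_self ..) with h | h <;> subst h <;> simp [bitChar]

-- range(0, L, 8) peels its head for positive L
lemma pyRange8_nonpos (L : Int) (h : L ≤ 0) : PySem.List.pyRange 0 L 8 = [] := by
  rw [PySem.List.pyRange_of_pos 0 L (by norm_num), if_neg (by omega)]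
  simp

lemma pyRange8_cons (L : Int) (h : 0 < L) :
    PySem.List.pyRange 0 L 8 = 0 :: (PySem.List.pyRange 0 (L - 8) 8).map (· + 8) := by
  rw [PySem.List.pyRange_of_pos 0 L (by norm_num),
      PySem.List.pyRange_of_pos 0 (L - 8) (by norm_num), if_pos h]
  have hcount : ((L - 0 + 8 - 1) / 8).toNat
      = (if 0 < L - 8 then ((L - 8 - 0 + 8 - 1) / 8).toNat else 0) + 1 := by
    by_cases h8 : 0 < L - 8
    · rw [if_pos h8]
      have : L - 0 + 8 - 1 = (L - 8 - 0 + 8 - 1) + 1 * 8 := by ring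
      rw [this, Int.add_mul_ediv_right _ _ (by norm_num)]
      have h0 : 0 ≤ (L - 8 - 0 + 8 - 1) / 8 := Int.ediv_nonneg (by omega) (by norm_num)
      omega
    · rw [if_neg h8]
      have h1 : (L - 0 + 8 - 1) / 8 = 1 := by omega
      omega
  rw [hcount, List.range_succ_eq_map]
  simp only [List.map_cons, List.map_map, Nat.cast_zero, mul_zero, add_zero]
  refine congrArg₂ List.cons (by norm_num) ?_
  apply List.map_congr_left
  intro k _
  simp only [Function.comp_apply, Nat.succ_eq_add_one]
  push_cast
  ring

lemma binOfChars_map' (l : List Int) (hl : ∀ v ∈ l, v = 0 ∨ v = 1) :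
    binOfChars (l.map bitChar) = binVal l := by
  unfold binOfChars binVal
  exact binOfChars_map l hl 0

lemma chunk_eq (N : Nat) : ∀ (l : List Int), l.length ≤ N → (∀ v ∈ l, v = 0 ∨ v = 1) →
    ∀ acc : List Int,
    (PySem.List.pyRange 0 ((l.map bitChar).length : Int) 8).foldl
      (fun acc i => acc ++ [binOfChars (PySem.List.slice (l.map bitChar) (some i) (some (i + 8)))]) acc
    = acc ++ pack l := by
  induction N with
  | zero =>
    intro l hlen _ acc
    have hnil : l = [] := List.eq_nil_of_length_eq_zero (by omega)
    subst hnil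
    simp [pack_nil, pyRange8_nonpos 0 (by norm_num)]
  | succ N ih =>
    intro l hlen hbits acc
    by_cases hnil : l = []
    · subst hnil
      simp [pack_nil, pyRange8_nonpos 0 (by norm_num)]
    · have hpos : 0 < l.length := List.length_pos_of_ne_nil hnil
      rw [List.length_map, pyRange8_cons _ (by exact_mod_cast hpos), List.foldl_cons, List.foldl_map]
      -- the first chunk is take 8
      have hslice0 : PySem.List.slice (l.map bitChar) (some 0) (some (0 + 8)) = (l.take 8).map bitChar := by
        have h8 : (8 : Int).toNat = 8 := by decide
        rw [PySem.List.slice_toNat _ (by norm_num) (by norm_num)]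
        simp [h8, List.map_take]
      rw [hslice0, binOfChars_map' _ (fun v hv => hbits v (List.mem_of_mem_take hv))]
      -- the remaining chunks are chunks of drop 8
      have hcongr : (PySem.List.pyRange 0 ((l.length : Int) - 8) 8).foldl
            (fun acc i => acc ++ [binOfChars (PySem.List.slice (l.map bitChar) (some (i + 8)) (some (i + 8 + 8)))])
            (acc ++ [binVal (l.take 8)])
          = (PySem.List.pyRange 0 ((l.length : Int) - 8) 8).foldl
            (fun acc i => acc ++ [binOfChars (PySem.List.slice ((l.drop 8).map bitChar) (some i) (some (i + 8)))])
            (acc ++ [binVal (l.take 8)]) := by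
        apply PySem.List.foldl_congr_mem
        intro a i hi
        have hi0 : 0 ≤ i := by
          have := (PySem.List.mem_pyRange_iff_of_pos (by norm_num : (0:Int) < 8) i).mp hi
          omega
        have h1 : PySem.List.slice (l.map bitChar) (some (i + 8)) (some (i + 8 + 8))
            = PySem.List.slice ((l.drop 8).map bitChar) (some i) (some (i + 8)) := by
          rw [PySem.List.slice_toNat _ (by omega) (by omega),
              PySem.List.slice_toNat _ (by omega) (by omega)]
          have e2 : (i + 8 + 8).toNat - (i + 8).toNat = 8 := by omega
          have e3 : (i + 8).toNat - i.toNat = 8 := by omega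
          have e1 : (i + 8).toNat = i.toNat + 8 := by omega
          rw [e2, e3, e1, ← List.map_drop, ← List.map_drop, ← List.map_take, ← List.map_take,
              List.drop_drop]
          congr 2
          rw [Nat.add_comm]
        rw [h1]
      rw [hcongr]
      have hrange : PySem.List.pyRange 0 ((l.length : Int) - 8) 8
          = PySem.List.pyRange 0 (((l.drop 8).map bitChar).length : Int) 8 := by
        rw [List.length_map, List.length_drop]
        by_cases h8 : 8 ≤ l.length
        · congr 1
          omega
        · rw [pyRange8_nonpos _ (by omega), pyRange8_nonpos _ (by omega)]
      rw [hrange, ih (l.drop 8) (by simp only [List.length_drop]; omega)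
            (fun v hv => hbits v (List.mem_of_mem_drop hv)) (acc ++ [binVal (l.take 8)])]
      conv_rhs => rw [pack, if_neg hnil]
      simp

-- B's fold with a partial byte in the accumulator
def bstep : (List Int × Int × Int) → Int → (List Int × Int × Int) :=
  fun st bit =>
    let cur := st.2.1 * 2 + bit
    let cnt := st.2.2 + 1
    if cnt = 8 then (st.1 ++ [cur], 0, 0) else (st.1, cur, cnt)

def bflush : (List Int × Int × Int) → List Int :=
  fun st => if st.2.2 > 0 then st.1 ++ [st.2.1] else st.1

lemma bfold_eq (l : List Int) : ∀ (p out : List Int), p.length < 8 →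
    bflush (l.foldl bstep (out, binVal p, (p.length : Int))) = out ++ pack (p ++ l) := by
  induction l with
  | nil =>
    intro p out hp
    simp only [List.foldl_nil, List.append_nil]
    by_cases hpe : p = []
    · subst hpe
      simp [bflush, pack_nil]
    · have hplen : 0 < p.length := List.length_pos_of_ne_nil hpe
      simp only [bflush]
      rw [if_pos (by exact_mod_cast hplen), pack_short p hpe hp]
  | cons v t ih =>
    intro p out hp
    rw [List.foldl_cons]
    have hstep : bstep (out, binVal p, (p.length : Int)) v =
        if (p.length : Int) + 1 = 8 then (out ++ [binVal (p ++ [v])], 0, 0)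
        else (out, binVal (p ++ [v]), ((p ++ [v]).length : Int)) := by
      rw [bstep]
      simp only [binVal_snoc, List.length_append, List.length_cons, List.length_nil]
      push_cast
      ring_nf
    rw [hstep]
    by_cases h7 : p.length = 7
    · rw [if_pos (by omega)]
      have h0 := ih [] (out ++ [binVal (p ++ [v])]) (by norm_num)
      simp only [show binVal [] = 0 from rfl, List.length_nil, Nat.cast_zero, List.nil_append] at h0
      rw [h0]
      have hpv : (p ++ [v]).length = 8 := by simp [h7]
      have : p ++ v :: t = (p ++ [v]) ++ t := by simp
      rw [this, pack_block _ _ hpv]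
      simp
    · rw [if_neg (by omega)]
      rw [ih (p ++ [v]) out (by simp; omega)]
      have : (p ++ [v]) ++ t = p ++ v :: t := by simp
      rw [this]

theorem stipple_eq_pack (r g b : List Int) (shiftr shiftg : Int) :
    stipple r g b shiftr shiftg = pack (bitsOf r g b shiftr shiftg) := by
  have hres : (PySem.List.pyRange 0 (r.length : Int) 1).foldl (fun res i =>
      ((res ++ (PySem.Int.toStr (PySem.Int.mod (PySem.List.pyGetD r (PySem.Int.mod (i + shiftr) (r.length : Int)) 0) 2)).toList)
            ++ (PySem.Int.toStr (PySem.Int.mod (PySem.List.pyGetD g (PySem.Int.mod (i + shiftg) (r.length : Int)) 0) 2)).toList)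
            ++ (PySem.Int.toStr (PySem.Int.mod (PySem.List.pyGetD b (PySem.Int.mod i (r.length : Int)) 0) 2)).toList) []
      = (bitsOf r g b shiftr shiftg).map bitChar := by
    rw [bitsOf, List.map_flatMap]
    simp only [List.append_assoc]
    rw [PySem.List.foldl_append_eq_flatMap]
    simp only [List.nil_append]
    congr 1
    funext i
    rw [toList_toStr_bit _ (PySem.Int.mod_two_eq _), toList_toStr_bit _ (PySem.Int.mod_two_eq _),
        toList_toStr_bit _ (PySem.Int.mod_two_eq _)]
    simp
  simp only [stipple]
  rw [hres, chunk_eq (bitsOf r g b shiftr shiftg).length _ le_rfl (bits_are_bits r g b shiftr shiftg) []]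
  simp

theorem stipple_alt_eq_pack (r g b : List Int) (shiftr shiftg : Int) :
    stipple_alt r g b shiftr shiftg = pack (bitsOf r g b shiftr shiftg) := by
  have h1 : stipple_alt r g b shiftr shiftg
      = bflush ((bitsOf r g b shiftr shiftg).foldl bstep ([], 0, 0)) := by
    rw [bitsOf, List.foldl_flatMap]
    rfl
  rw [h1]
  have h2 := bfold_eq (bitsOf r g b shiftr shiftg) [] [] (by norm_num)
  simp only [binVal, List.foldl_nil, List.length_nil, Nat.cast_zero, List.nil_append] at h2
  exact h2

-- ===== VERDICT (by name: the statement is the Claim_ definition above) =====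
theorem stipple_spec : Claim_equal_stipple := by
  intro r g b shiftr shiftg _ _
  unfold Spec_stipple
  rw [stipple_eq_pack, stipple_alt_eq_pack]
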